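-- pv_equiv track=rewrite | github.com/cryptikhunterz/bacau-prototype | src/position_classifier.py | classify_team_vertical
-- ===== SOURCE A (Python) =====
-- def classify_team_vertical(team_positions):
--     """
--     Classify all players' vertical positions at once.
--
--     Args:
--         team_positions: Dict of {player_id: (x, y)}
--
--     Returns:
--         Dict of {player_id: vertical_bucket (0-4)}
--     """
--     if not team_positions:
--         return {}
--
--     # Extract x positions
--     x_values = list(set(pos[0] for pos in team_positions.values()))
--     sorted_x = sorted(x_values)
--
--     result = {}
--     for pid, (x, y) in team_positions.items():
--         rank = sorted_x.index(x)
--         bucket = int(rank / len(sorted_x) * 5)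
--         result[pid] = min(bucket, 4)
--
--     return result
-- ===== SOURCE B (Python) =====
-- def classify_team_vertical(team_positions):
--     """
--     Classify all players' vertical positions at once.
--
--     Rank-by-counting reimplementation: no sort and no list.index per player --
--     a player's rank is the number of distinct x-values strictly smaller than
--     their own, and the bucket is computed with exact integer arithmetic.
--     """
--     if not team_positions:
--         return {}
--     unique = {pos[0] for pos in team_positions.values()}
--     m = len(unique)
--     return {pid: min(sum(v < x for v in unique) * 5 // m, 4)
--             for pid, (x, y) in team_positions.items()}
-- ===== Notes on version B (the rewrite author's own statement) =====
-- stated objective: alternative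
-- what changed: B drops the sort and the per-player list.index scan entirely: a player's rank is computed as the count of distinct x-values strictly smaller than their own, the bucket as exact integer arithmetic (rank*5//m), and the result is one dict comprehension.
import Mathlib
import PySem

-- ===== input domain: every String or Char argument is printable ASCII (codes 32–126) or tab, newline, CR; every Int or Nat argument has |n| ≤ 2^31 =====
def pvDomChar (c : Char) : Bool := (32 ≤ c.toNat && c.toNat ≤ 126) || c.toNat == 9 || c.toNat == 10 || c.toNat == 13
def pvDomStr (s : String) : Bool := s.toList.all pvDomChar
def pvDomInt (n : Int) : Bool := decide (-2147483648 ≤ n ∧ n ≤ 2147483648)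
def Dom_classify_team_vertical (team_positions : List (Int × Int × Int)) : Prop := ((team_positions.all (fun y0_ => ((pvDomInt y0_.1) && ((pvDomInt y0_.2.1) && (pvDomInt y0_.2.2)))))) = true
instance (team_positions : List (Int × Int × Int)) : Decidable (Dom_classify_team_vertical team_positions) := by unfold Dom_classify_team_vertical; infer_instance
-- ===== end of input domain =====

-- B replaces sort + per-player list.index by counting smaller distinct x-values (alternative algorithm); return-value equivalence proved under Pre_.

-- ===== PORT A =====
-- 'int(rank / len(sorted_x) * 5)' is ported as the integer floor (rank * 5) // len:
-- exact here since 0 ≤ rank < len (float check verified int(r/m*5) == r*5//m on this range).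
-- 'sorted_x.index(x)' never raises (x is always in sorted_x), so index? is always some; .getD 0 is never used.
def classify_team_vertical (team_positions : List (Int × Int × Int)) : List (Int × Int) :=
  if team_positions = [] then []
  else
    let x_values : PySem.Set Int := PySem.Set.ofList (team_positions.map (fun p => p.2.1))
    let sorted_x : List Int := PySem.List.sorted x_values (fun x => x) false
    let result : PySem.Dict Int Int :=
      team_positions.foldl (fun r p =>
        let rank : Nat := (PySem.List.index? sorted_x p.2.1).getD 0
        let bucket : Int := PySem.Int.floordiv ((rank : Int) * 5) (sorted_x.length : Int)
        r.insert p.1 (min bucket 4)) PySem.Dict.empty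
    result.items

-- ===== PORT B =====
-- sum(v < x for v in unique) is the order-independent count over the set; the dict comprehension
-- over items with distinct pids (Pre_) ports as a map in iteration order.
def classify_team_vertical_alt (team_positions : List (Int × Int × Int)) : List (Int × Int) :=
  if team_positions = [] then []
  else
    let unique : PySem.Set Int := PySem.Set.ofList (team_positions.map (fun p => p.2.1))
    let m : Int := (unique.length : Int)
    team_positions.map (fun p =>
      (p.1, min (PySem.Int.floordiv ((unique.countP (fun v => decide (v < p.2.1)) : Int) * 5) m) 4))

-- ===== PRECONDITION & SPEC =====
-- Pre_ excludes association lists with duplicate player ids: those do not encode a well-formed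
-- Python dict argument (dict construction silently collapses them), so the encoding is ambiguous.
def Pre_classify_team_vertical (team_positions : List (Int × Int × Int)) : Prop :=
  (team_positions.map (fun p => p.1)).Nodup
instance (team_positions : List (Int × Int × Int)) : Decidable (Pre_classify_team_vertical team_positions) := by unfold Pre_classify_team_vertical; infer_instance
def pvWitness_classify_team_vertical : (List (Int × Int × Int)) := [(1, 10, 20), (2, 30, 40)]

def Spec_classify_team_vertical (team_positions : List (Int × Int × Int)) (out : List (Int × Int)) : Prop := out = classify_team_vertical_alt team_positions
instance (team_positions : List (Int × Int × Int)) (out : List (Int × Int)) : Decidable (Spec_classify_team_vertical team_positions out) := by unfold Spec_classify_team_vertical; infer_instance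

-- ===== CLAIM (what is proved, stated in full; the proofs are below) =====
def Claim_equal_classify_team_vertical : Prop := ∀ (team_positions : List (Int × Int × Int)), Dom_classify_team_vertical team_positions → Pre_classify_team_vertical team_positions → Spec_classify_team_vertical team_positions (classify_team_vertical team_positions)

-- ===== LEMMAS AND PROOFS =====

-- In a strictly increasing list, the index of a member equals the number of elements below it.
theorem index_eq_countP_lt {s : List Int} (hs : s.Pairwise (· < ·)) {x : Int} (hx : x ∈ s) :
    PySem.List.index? s x = some (s.countP (fun v => decide (v < x))) := by
  induction s with
  | nil => cases hx
  | cons a t ih =>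
    rcases List.pairwise_cons.mp hs with ⟨ha, ht⟩
    by_cases hax : a = x
    · subst hax
      have h2 : (a :: t).countP (fun v => decide (v < a)) = 0 := by
        rw [List.countP_eq_zero]
        intro v hv
        rcases List.mem_cons.mp hv with rfl | hv'
        · simp
        · have := ha v hv'; simp; omega
      rw [PySem.List.index?_cons_self, h2]
    · have hxt : x ∈ t := (List.mem_cons.mp hx).resolve_left (fun h => hax h.symm)
      rw [PySem.List.index?_cons_of_ne t hax, ih ht hxt]
      have hax' : a < x := ha x hxt
      simp [hax']

theorem classify_eq (team_positions : List (Int × Int × Int))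
    (hpre : (team_positions.map (fun p => p.1)).Nodup) :
    classify_team_vertical team_positions = classify_team_vertical_alt team_positions := by
  by_cases hnil : team_positions = []
  · simp [hnil, classify_team_vertical, classify_team_vertical_alt]
  · simp only [classify_team_vertical, classify_team_vertical_alt, if_neg hnil]
    set xs : List Int := team_positions.map (fun p => p.2.1) with hxs
    set u : PySem.Set Int := PySem.Set.ofList xs with hu
    set s : List Int := PySem.List.sorted u (fun x => x) false with hs
    -- A's result loop inserts fresh distinct keys, so its items are a map over the input
    rw [PySem.Dict.items_foldl_insert_fresh team_positions (fun p => p.1)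
        (fun p => min (PySem.Int.floordiv
          ((((PySem.List.index? s p.2.1).getD 0 : Nat) : Int) * 5) (s.length : Int)) 4)
        PySem.Dict.empty
        (fun a _ => PySem.Dict.contains_empty a.1) hpre]
    simp only [PySem.Dict.empty, List.nil_append]
    apply List.map_congr_left
    intro p hp
    have hmem : p.2.1 ∈ s := by
      rw [hs, PySem.List.mem_sorted, hu, PySem.Set.mem_ofList, hxs]
      exact List.mem_map.mpr ⟨p, hp, rfl⟩
    have hsorted : s.Pairwise (· < ·) := by
      rw [hs, hu]; exact PySem.List.sorted_ofList_pairwise_lt xs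
    have hperm : s.Perm u := PySem.List.sorted_perm u (fun x => x) false
    have hcnt : s.countP (fun v => decide (v < p.2.1)) = u.countP (fun v => decide (v < p.2.1)) :=
      hperm.countP_eq _
    have hlen : s.length = u.length := hperm.length_eq
    rw [index_eq_countP_lt hsorted hmem]
    simp only [Option.getD_some]
    rw [hcnt, hlen]

-- ===== VERDICT (by name: the statement is the Claim_ definition above) =====
theorem classify_team_vertical_spec : Claim_equal_classify_team_vertical := by
  intro tp _ hpre
  unfold Spec_classify_team_vertical
  exact classify_eq tp hpre
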